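-- pv_equiv track=rewrite | github.com/RoiGerber/Navy-scheduler | Project Files/Rules.py | NotMoreThan3d
-- ===== SOURCE A (Python) =====
-- def NotMoreThan3d(Day,HowToAllocate,Info,History):
--     if len(History) < 3:
--         return True
--     else:
--         for Ship in HowToAllocate:
--             DayInARow = 0
--             for HistoryDay in History[-3:]:
--                 if Ship in HistoryDay:
--                     DayInARow += 1
--                     if DayInARow > 2:
--                         return False
--     return True
-- ===== SOURCE B (Python) =====
-- def NotMoreThan3d(Day, HowToAllocate, Info, History):
--     if len(History) < 3:
--         return True
--     common = set(History[-3]) & set(History[-2]) & set(History[-1])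
--     for Ship in HowToAllocate:
--         if Ship in common:
--             return False
--     return True
-- ===== Notes on version B (the rewrite author's own statement) =====
-- stated objective: alternative
-- what changed: Instead of re-scanning the last three history days per ship with a streak counter, B precomputes the three-way set intersection of the last three days once and then makes a single membership pass over the ships (reversed loop nesting).
import Mathlib
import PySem

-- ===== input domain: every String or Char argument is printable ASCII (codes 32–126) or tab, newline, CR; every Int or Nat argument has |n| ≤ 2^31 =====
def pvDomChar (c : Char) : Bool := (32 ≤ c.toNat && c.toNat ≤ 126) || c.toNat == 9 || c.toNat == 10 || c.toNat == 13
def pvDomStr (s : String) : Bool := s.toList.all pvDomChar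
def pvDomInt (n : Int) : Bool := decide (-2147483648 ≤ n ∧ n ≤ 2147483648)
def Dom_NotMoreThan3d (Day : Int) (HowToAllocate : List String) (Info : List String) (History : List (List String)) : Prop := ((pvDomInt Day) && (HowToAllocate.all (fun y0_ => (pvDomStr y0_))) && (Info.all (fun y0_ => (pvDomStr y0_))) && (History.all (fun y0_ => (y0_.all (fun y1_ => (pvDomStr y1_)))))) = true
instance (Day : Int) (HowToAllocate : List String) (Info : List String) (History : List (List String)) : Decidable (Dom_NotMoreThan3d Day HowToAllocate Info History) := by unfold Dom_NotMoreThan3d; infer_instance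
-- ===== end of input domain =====

-- B replaces A's per-ship rescans of the last three days by one precomputed
-- three-way set intersection followed by a single membership pass over the ships
-- (one pass over the days then one pass over the ships, instead of per-ship rescans; return value only).


-- ===== PORT A =====
-- inner 'for HistoryDay in History[-3:]' loop with the DayInARow counter;
-- returns true iff the loop hits 'return False'
def pvADayLoop (Ship : String) : List (List String) → Int → Bool
  | [], _ => false
  | d :: rest, cnt =>
    if d.contains Ship then
      if cnt + 1 > 2 then true else pvADayLoop Ship rest (cnt + 1)
    else pvADayLoop Ship rest cnt

-- outer 'for Ship in HowToAllocate' loop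
def pvAShipLoop (last3 : List (List String)) : List String → Bool
  | [] => true
  | s :: rest => if pvADayLoop s last3 0 then false else pvAShipLoop last3 rest

def NotMoreThan3d (Day : Int) (HowToAllocate : List String) (Info : List String) (History : List (List String)) : Bool :=
  if History.length < 3 then true
  else pvAShipLoop (PySem.List.slice History (some (-3)) none) HowToAllocate

-- ===== PORT B =====
-- 'for Ship in HowToAllocate: if Ship in common: return False' / 'return True'
def pvBShipLoop (common : PySem.Set String) : List String → Bool
  | [] => true
  | s :: rest => if PySem.Set.contains common s then false else pvBShipLoop common rest

def NotMoreThan3d_alt (Day : Int) (HowToAllocate : List String) (Info : List String) (History : List (List String)) : Bool :=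
  if History.length < 3 then true
  else
    -- History[-3]/[-2]/[-1]: pyGetD is exact here since the guard makes each index in range
    let common := PySem.Set.inter
      (PySem.Set.inter (PySem.Set.ofList (PySem.List.pyGetD History (-3) []))
        (PySem.List.pyGetD History (-2) []))
      (PySem.List.pyGetD History (-1) [])
    pvBShipLoop common HowToAllocate

-- ===== PRECONDITION & SPEC =====
def Spec_NotMoreThan3d (Day : Int) (HowToAllocate : List String) (Info : List String) (History : List (List String)) (out : Bool) : Prop := out = NotMoreThan3d_alt Day HowToAllocate Info History
instance (Day : Int) (HowToAllocate : List String) (Info : List String) (History : List (List String)) (out : Bool) : Decidable (Spec_NotMoreThan3d Day HowToAllocate Info History out) := by unfold Spec_NotMoreThan3d; infer_instance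

-- ===== CLAIM (what is proved, stated in full; the proofs are below) =====
def Claim_equal_NotMoreThan3d : Prop := ∀ (Day : Int) (HowToAllocate : List String) (Info : List String) (History : List (List String)), Dom_NotMoreThan3d Day HowToAllocate Info History → Spec_NotMoreThan3d Day HowToAllocate Info History (NotMoreThan3d Day HowToAllocate Info History)

-- ===== LEMMAS AND PROOFS =====

-- A's streak counter over exactly three days is just 'in all three days'
theorem pvADayLoop_three (s : String) (d0 d1 d2 : List String) :
    pvADayLoop s [d0, d1, d2] 0 = (d0.contains s && d1.contains s && d2.contains s) := by
  by_cases h0 : d0.contains s <;> by_cases h1 : d1.contains s <;> by_cases h2 : d2.contains s <;>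
    simp [pvADayLoop, h0, h1, h2, Bool.and_assoc]  -- h0..h2 close the branch conditions where applicable

theorem pvCommon_contains (s : String) (d0 d1 d2 : List String) :
    PySem.Set.contains
      (PySem.Set.inter (PySem.Set.inter (PySem.Set.ofList d0) d1) d2) s
      = (d0.contains s && d1.contains s && d2.contains s) := by
  rw [Bool.eq_iff_iff]
  simp only [Bool.and_eq_true, PySem.Set.contains_iff,
    PySem.Set.mem_inter, PySem.Set.mem_ofList, List.contains_iff_mem]

theorem pvLoops_agree (d0 d1 d2 : List String) (ships : List String) :
    pvAShipLoop [d0, d1, d2] ships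
      = pvBShipLoop (PySem.Set.inter (PySem.Set.inter (PySem.Set.ofList d0) d1) d2) ships := by
  induction ships with
  | nil => rfl
  | cons s rest ih =>
    simp only [pvAShipLoop, pvBShipLoop, pvADayLoop_three, pvCommon_contains, ih]

theorem pvDrop_len_sub_three {α : Type} (xs : List α) (h : 3 ≤ xs.length) :
    ∃ d0 d1 d2, xs.drop (xs.length - 3) = [d0, d1, d2] := by
  have hl : (xs.drop (xs.length - 3)).length = 3 := by
    rw [List.length_drop]; omega
  rcases hm : xs.drop (xs.length - 3) with _ | ⟨d0, _ | ⟨d1, _ | ⟨d2, rest⟩⟩⟩ <;>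
      rw [hm] at hl <;> simp at hl
  subst hl
  exact ⟨d0, d1, d2, rfl⟩

-- ===== VERDICT (by name: the statement is the Claim_ definition above) =====
theorem NotMoreThan3d_spec : Claim_equal_NotMoreThan3d := by
  intro Day HowToAllocate Info History _
  unfold Spec_NotMoreThan3d NotMoreThan3d NotMoreThan3d_alt
  by_cases h : History.length < 3
  · simp [h]
  · have h3 : 3 ≤ History.length := by omega
    obtain ⟨d0, d1, d2, hd⟩ := pvDrop_len_sub_three History h3
    have hslice : PySem.List.slice History (some (-3)) none = [d0, d1, d2] := by
      rw [PySem.List.slice_from_neg_ofNat History 3 (by omega)]; exact hd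
    have hg3 : PySem.List.pyGetD History (-3) [] = d0 := by
      rw [PySem.List.pyGetD_neg_ofNat History 3 [] (by omega) h3]
      have := @List.getElem_drop _ History (History.length - 3) 0 (by rw [hd]; simp)
      simp [hd] at this
      simpa using this.symm
    have hg2 : PySem.List.pyGetD History (-2) [] = d1 := by
      rw [PySem.List.pyGetD_neg_ofNat History 2 [] (by omega) (by omega)]
      have := @List.getElem_drop _ History (History.length - 3) 1 (by rw [hd]; simp)
      simp [hd] at this
      have he : History.length - 3 + 1 = History.length - 2 := by omega
      simp only [he] at this
      simpa using this.symm
    have hg1 : PySem.List.pyGetD History (-1) [] = d2 := by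
      rw [PySem.List.pyGetD_neg_ofNat History 1 [] (by omega) (by omega)]
      have := @List.getElem_drop _ History (History.length - 3) 2 (by rw [hd]; simp)
      simp [hd] at this
      have he : History.length - 3 + 2 = History.length - 1 := by omega
      simp only [he] at this
      simpa using this.symm
    simp only [h, if_false, hslice, hg3, hg2, hg1]
    exact pvLoops_agree d0 d1 d2 HowToAllocate
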